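-- pv_equiv track=rewrite | github.com/Ashiq-am/Data-Structures-Algorithm | 1.Python Algorithms/8.Bitwise Algorithms/1.Basic/60.Toggle all even bits of a number/Example 1.py | evenbittogglenumber
-- ===== SOURCE A (Python) =====
-- def evenbittogglenumber(n):
--     # Generate number form of 101010
--     # ..till of same order as n
--     res = 0
--     count = 0
--     temp = n
--
--     while (temp > 0):
--
--         # if bit is even then generate
--         # number and or with res
--         if (count % 2 == 1):
--             res = res | (1 << count)
--
--         count = count + 1
--         temp >>= 1
--
--     # return toggled number
--     return n ^ res
-- ===== SOURCE B (Python) =====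
-- def evenbittogglenumber(n):
--     if n <= 0:
--         return n
--     k = n.bit_length() // 2
--     return n ^ (2 * (4 ** k - 1) // 3)
-- ===== Notes on version B (the rewrite author's own statement) =====
-- stated objective: simpler
-- what changed: Replaces the bit-by-bit while loop with a closed-form geometric-series formula for the alternating odd-position mask computed from the bit length.
import Mathlib
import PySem

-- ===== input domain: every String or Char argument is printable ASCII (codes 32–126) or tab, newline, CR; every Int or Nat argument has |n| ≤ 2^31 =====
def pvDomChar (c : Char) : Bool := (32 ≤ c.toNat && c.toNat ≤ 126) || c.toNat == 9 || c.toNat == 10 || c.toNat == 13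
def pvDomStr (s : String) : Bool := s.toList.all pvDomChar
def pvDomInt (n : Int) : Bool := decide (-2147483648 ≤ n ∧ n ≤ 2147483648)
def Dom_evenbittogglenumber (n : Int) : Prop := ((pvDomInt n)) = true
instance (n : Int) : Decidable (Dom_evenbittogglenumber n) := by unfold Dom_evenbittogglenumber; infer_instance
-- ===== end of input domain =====

-- B replaces A's bit-by-bit mask-building loop with the closed-form geometric-series formula for the odd-position mask (simpler).

-- ===== PORT A =====
-- the while loop: test temp > 0, or-in 1 << count when count is odd, count += 1, temp >>= 1
def evenbittoggleLoop (temp : Int) (count : Nat) (res : Int) : Int :=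
  if h : temp > 0 then
    evenbittoggleLoop (temp >>> (1:Nat)) (count + 1)
      (if count % 2 = 1 then Int.lor res (Int.shiftLeft 1 count) else res)
  else res
termination_by temp.toNat
decreasing_by
  have h1 : temp >>> (1:Nat) = temp / 2 := by rw [Int.shiftRight_eq_div_pow]; norm_num
  rw [h1]; omega

def evenbittogglenumber (n : Int) : Int :=
  Int.xor n (evenbittoggleLoop n 0 0)

-- ===== PORT B =====
-- models Python's int.bit_length() for nonnegative arguments
def pyBitLength (t : Nat) : Nat :=
  if t = 0 then 0 else pyBitLength (t / 2) + 1

def evenbittogglenumber_alt (n : Int) : Int :=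
  if n ≤ 0 then n
  else
    let k := pyBitLength n.toNat / 2
    Int.xor n (PySem.Int.floordiv (2 * ((4 : Int) ^ k - 1)) 3)

-- ===== PRECONDITION & SPEC =====
def Spec_evenbittogglenumber (n : Int) (out : Int) : Prop := out = evenbittogglenumber_alt n
instance (n : Int) (out : Int) : Decidable (Spec_evenbittogglenumber n out) := by unfold Spec_evenbittogglenumber; infer_instance

-- ===== CLAIM (what is proved, stated in full; the proofs are below) =====
def Claim_equal_evenbittogglenumber : Prop := ∀ (n : Int), Dom_evenbittogglenumber n → Spec_evenbittogglenumber n (evenbittogglenumber n)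

-- ===== LEMMAS AND PROOFS =====

-- A's loop value depends on temp only through its bit length: loop indexed by that length
def loopL : Nat → Nat → Int → Int
  | 0, _, r => r
  | L + 1, c, r => loopL L (c + 1) (if c % 2 = 1 then Int.lor r (Int.shiftLeft 1 c) else r)

theorem evenbittoggleLoop_eq (t : Int) (ht : 0 ≤ t) (c : Nat) (r : Int) :
    evenbittoggleLoop t c r = loopL (pyBitLength t.toNat) c r := by
  generalize hk : t.toNat = k
  induction k using Nat.strong_induction_on generalizing t c r with
  | _ k ih =>
    by_cases hpos : t > 0
    · rw [evenbittoggleLoop.eq_def]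
      simp only [hpos, dif_pos]
      have h1 : t >>> (1:Nat) = t / 2 := by rw [Int.shiftRight_eq_div_pow]; norm_num
      have h2 : (t >>> (1:Nat)).toNat = k / 2 := by rw [h1]; omega
      have hk0 : k ≠ 0 := by omega
      have hbl : pyBitLength k = pyBitLength (k / 2) + 1 := by
        rw [pyBitLength.eq_def, if_neg hk0]
      rw [ih (k / 2) (by omega) (t >>> (1:Nat)) (by rw [h1]; omega) _ _ h2, hbl]
      rfl
    · rw [evenbittoggleLoop.eq_def]
      have : k = 0 := by omega
      simp [hpos, this, pyBitLength, loopL]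

theorem pyBitLength_le (k : Nat) : ∀ t : Nat, t < 2 ^ k → pyBitLength t ≤ k := by
  induction k with
  | zero => intro t ht; interval_cases t; simp [pyBitLength]
  | succ k ih =>
    intro t ht
    rw [pyBitLength.eq_def]
    split
    · omega
    · have := ih (t / 2) (by omega)
      omega

-- the mask equality, for every bit length reachable inside Dom (|n| ≤ 2^31 ⇒ bit length ≤ 32)
theorem mask_eq (L : Nat) (hL : L ≤ 32) :
    loopL L 0 0 = PySem.Int.floordiv (2 * ((4 : Int) ^ (L / 2) - 1)) 3 := by
  interval_cases L <;> decide

-- ===== VERDICT (by name: the statement is the Claim_ definition above) =====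
theorem evenbittogglenumber_spec : Claim_equal_evenbittogglenumber := by
  intro n hdom
  unfold Spec_evenbittogglenumber evenbittogglenumber evenbittogglenumber_alt
  have hdom' : -2147483648 ≤ n ∧ n ≤ 2147483648 := by
    simpa [pvDomInt, Dom_evenbittogglenumber] using hdom
  by_cases hn : n ≤ 0
  · have h0 : ¬ n > 0 := by omega
    rw [evenbittoggleLoop.eq_def]
    simp [h0, hn]
    cases n <;> simp [Int.xor, Nat.xor_zero]
  · have hpos : 0 ≤ n := by omega
    rw [evenbittoggleLoop_eq n hpos 0 0]
    have hlen : pyBitLength n.toNat ≤ 32 := by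
      apply pyBitLength_le
      omega
    rw [mask_eq _ hlen]
    simp [hn]
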